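-- pv_equiv track=rewrite | github.com/Jyoshithapechetti/BA_project | app.py | classify_severity_from_list
-- ===== SOURCE A (Python) =====
-- SEVERITY_MAP = {
--     # High
--     "death":"High","cardiac arrest":"High","stroke":"High","seizure":"High",
--     "suicidal":"High","respiratory failure":"High","liver failure":"High","kidney failure":"High",
--     # Medium
--     "depression":"Medium","anxiety":"Medium","bleeding":"Medium","hypertension":"Medium",
--     "palpitations":"Medium","chest pain":"Medium","dizziness":"Medium","insomnia":"Medium",
--     "hallucination":"Medium","edema":"Medium",
--     # Low
--     "nausea":"Low","vomiting":"Low","headache":"Low","fatigue":"Low","rash":"Low","itching":"Low",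
--     "dry mouth":"Low","diarrhea":"Low","constipation":"Low","sweating":"Low",
--     "weight gain":"Low","weight loss":"Low","pain":"Low","back pain":"Low","muscle pain":"Low","joint pain":"Low","cough":"Low","tremor":"Low","sleepiness":"Low"
-- }
--
-- def classify_severity_from_list(se_list: list) -> str|None:
--     if not se_list:
--         return None
--     levels = []
--     for se in se_list:
--         lvl = SEVERITY_MAP.get(se.lower())
--         if lvl:
--             levels.append(lvl)
--     if "High" in levels:
--         return "High"
--     if "Medium" in levels:
--         return "Medium"
--     if "Low" in levels:
--         return "Low"
--     return None
-- ===== SOURCE B (Python) =====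
-- HIGH_SET = {"death","cardiac arrest","stroke","seizure",
--             "suicidal","respiratory failure","liver failure","kidney failure"}
-- MEDIUM_SET = {"depression","anxiety","bleeding","hypertension",
--               "palpitations","chest pain","dizziness","insomnia",
--               "hallucination","edema"}
-- LOW_SET = {"nausea","vomiting","headache","fatigue","rash","itching",
--            "dry mouth","diarrhea","constipation","sweating",
--            "weight gain","weight loss","pain","back pain","muscle pain",
--            "joint pain","cough","tremor","sleepiness"}
--
-- def classify_severity_from_list(se_list: list) -> str | None:
--     result = None
--     for se in se_list:
--         s = se.lower()
--         if s in HIGH_SET: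
--             return "High"            # early exit: nothing can beat High
--         if s in MEDIUM_SET:
--             result = "Medium"
--         elif s in LOW_SET and result is None:
--             result = "Low"
--     return result
-- ===== Notes on version B (the rewrite author's own statement) =====
-- stated objective: alternative
-- what changed: Replaces the dict-lookup, build-a-levels-list-then-three-membership-scans structure with three per-level sets and a single pass that early-exits on the first High match and otherwise keeps a best-so-far label, no intermediate list.
import Mathlib
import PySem

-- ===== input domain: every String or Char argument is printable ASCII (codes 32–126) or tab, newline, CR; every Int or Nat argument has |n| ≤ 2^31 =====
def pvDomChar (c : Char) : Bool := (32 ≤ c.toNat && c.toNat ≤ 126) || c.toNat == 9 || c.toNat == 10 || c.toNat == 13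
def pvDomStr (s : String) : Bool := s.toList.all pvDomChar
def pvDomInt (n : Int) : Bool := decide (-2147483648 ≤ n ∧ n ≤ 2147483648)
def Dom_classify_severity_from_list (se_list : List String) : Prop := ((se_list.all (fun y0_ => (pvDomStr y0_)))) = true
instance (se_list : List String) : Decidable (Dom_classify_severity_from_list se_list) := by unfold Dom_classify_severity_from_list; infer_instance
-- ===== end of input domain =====

-- B replaces A's dict-lookup + build-a-levels-list + three membership scans with three per-level
-- sets and a single early-exiting pass keeping a best-so-far label (objective: alternative).

-- ===== PORT A =====
def sevMap : PySem.Dict String String := PySem.Dict.mk [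
  ("death","High"),("cardiac arrest","High"),("stroke","High"),("seizure","High"),
  ("suicidal","High"),("respiratory failure","High"),("liver failure","High"),("kidney failure","High"),
  ("depression","Medium"),("anxiety","Medium"),("bleeding","Medium"),("hypertension","Medium"),
  ("palpitations","Medium"),("chest pain","Medium"),("dizziness","Medium"),("insomnia","Medium"),
  ("hallucination","Medium"),("edema","Medium"),
  ("nausea","Low"),("vomiting","Low"),("headache","Low"),("fatigue","Low"),("rash","Low"),("itching","Low"),
  ("dry mouth","Low"),("diarrhea","Low"),("constipation","Low"),("sweating","Low"),
  ("weight gain","Low"),("weight loss","Low"),("pain","Low"),("back pain","Low"),("muscle pain","Low"),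
  ("joint pain","Low"),("cough","Low"),("tremor","Low"),("sleepiness","Low")]

def levelsStep (acc : List String) (se : String) : List String :=
  match sevMap.get? (PySem.Str.lower se) with
  | some lvl => if lvl ≠ "" then acc ++ [lvl] else acc   -- `if lvl:` — truthy = present and nonempty
  | none => acc

def classify_severity_from_list (se_list : List String) : Option String :=
  if se_list = [] then none
  else
    let levels := se_list.foldl levelsStep []
    if "High" ∈ levels then some "High"
    else if "Medium" ∈ levels then some "Medium"
    else if "Low" ∈ levels then some "Low"
    else none

-- ===== PORT B =====
-- B's three Python sets of literals, as PySem sets (distinct elements)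
def highSet : PySem.Set String := PySem.Set.ofList
  ["death","cardiac arrest","stroke","seizure",
   "suicidal","respiratory failure","liver failure","kidney failure"]
def mediumSet : PySem.Set String := PySem.Set.ofList
  ["depression","anxiety","bleeding","hypertension",
   "palpitations","chest pain","dizziness","insomnia",
   "hallucination","edema"]
def lowSet : PySem.Set String := PySem.Set.ofList
  ["nausea","vomiting","headache","fatigue","rash","itching",
   "dry mouth","diarrhea","constipation","sweating",
   "weight gain","weight loss","pain","back pain","muscle pain",
   "joint pain","cough","tremor","sleepiness"]

-- B's loop: `return "High"` = stop recursing; `result` is the accumulator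
def goB : List String → Option String → Option String
  | [], result => result
  | se :: rest, result =>
    let s := PySem.Str.lower se
    if highSet.contains s then some "High"
    else if mediumSet.contains s then goB rest (some "Medium")
    else if lowSet.contains s && (result == none) then goB rest (some "Low")
    else goB rest result

def classify_severity_from_list_alt (se_list : List String) : Option String :=
  goB se_list none

-- ===== PRECONDITION & SPEC =====
def Spec_classify_severity_from_list (se_list : List String) (out : Option String) : Prop := out = classify_severity_from_list_alt se_list
instance (se_list : List String) (out : Option String) : Decidable (Spec_classify_severity_from_list se_list out) := by unfold Spec_classify_severity_from_list; infer_instance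

-- ===== CLAIM =====
def Claim_equal_classify_severity_from_list : Prop := ∀ (se_list : List String), Dom_classify_severity_from_list se_list → Spec_classify_severity_from_list se_list (classify_severity_from_list se_list)

-- ===== LEMMAS AND PROOFS =====

-- generic facts about literal association dicts
lemma get?_mk_append {v : Type} (l1 l2 : List (String × v)) (x : String) :
    (PySem.Dict.mk (l1 ++ l2)).get? x =
      ((PySem.Dict.mk l1).get? x).orElse (fun _ => (PySem.Dict.mk l2).get? x) := by
  induction l1 with
  | nil => simp [PySem.Dict.get?, PySem.Dict.mk]
  | cons p rest ih =>
    obtain ⟨k, w⟩ := p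
    simp only [List.cons_append, PySem.Dict.get?_mk_cons, ih]
    split <;> rfl

lemma get?_mk_const (w : String) (ks : List String) (x : String) :
    (PySem.Dict.mk (ks.map (fun k => (k, w)))).get? x = if x ∈ ks then some w else none := by
  induction ks with
  | nil => simp [PySem.Dict.get?, PySem.Dict.mk]
  | cons k rest ih =>
    simp only [List.map_cons, PySem.Dict.get?_mk_cons, ih, List.mem_cons]
    by_cases hk : k = x
    · simp [hk]
    · simp [hk, beq_iff_eq, Ne.symm hk]

-- A's dict is exactly B's three sets, tagged with their level
lemma sevMap_eq : sevMap = PySem.Dict.mk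
    ((highSet.map fun k => (k, "High")) ++
     ((mediumSet.map fun k => (k, "Medium")) ++ (lowSet.map fun k => (k, "Low")))) := by
  decide

-- A's dict lookup, characterised by B's three sets
lemma lookup_eq (s : String) :
    sevMap.get? s =
      if s ∈ highSet then some "High"
      else if s ∈ mediumSet then some "Medium"
      else if s ∈ lowSet then some "Low"
      else none := by
  rw [sevMap_eq, get?_mk_append, get?_mk_append, get?_mk_const, get?_mk_const, get?_mk_const]
  split_ifs <;> rfl

lemma high_not_med : ∀ s ∈ highSet, s ∉ mediumSet := by decide
lemma high_not_low : ∀ s ∈ highSet, s ∉ lowSet := by decide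
lemma med_not_low : ∀ s ∈ mediumSet, s ∉ lowSet := by decide

lemma lookup_high (s : String) : sevMap.get? s = some "High" ↔ s ∈ highSet := by
  rw [lookup_eq]; split_ifs with h1 h2 h3 <;> simp_all
lemma lookup_medium (s : String) : sevMap.get? s = some "Medium" ↔ s ∈ mediumSet := by
  rw [lookup_eq]; split_ifs with h1 h2 h3 <;> simp_all
  exact high_not_med s h1
lemma lookup_low (s : String) : sevMap.get? s = some "Low" ↔ s ∈ lowSet := by
  rw [lookup_eq]; split_ifs with h1 h2 h3 <;> simp_all
  · exact high_not_low s h1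
  · exact med_not_low s h2

-- membership in A's levels list, in terms of hits on the corresponding set
lemma mem_levels_iff (l : String) (T : List String)
    (h : ∀ s, sevMap.get? s = some l ↔ s ∈ T)
    (xs : List String) (acc : List String) :
    (l ∈ xs.foldl levelsStep acc) ↔ (l ∈ acc ∨ ∃ se ∈ xs, PySem.Str.lower se ∈ T) := by
  induction xs generalizing acc with
  | nil => simp
  | cons x rest ih =>
    rw [List.foldl_cons, ih]
    cases hx : sevMap.get? (PySem.Str.lower x) with
    | none =>
      have hT : PySem.Str.lower x ∉ T := fun hc => by simp [(h _).mpr hc] at hx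
      simp only [levelsStep, hx]
      constructor <;> aesop
    | some lvl =>
      have hne : lvl ≠ "" := by
        have h2 := lookup_eq (PySem.Str.lower x)
        rw [hx] at h2
        split_ifs at h2 <;> simp_all
      by_cases heq : lvl = l
      · subst heq
        have hT : PySem.Str.lower x ∈ T := (h _).mp hx
        simp only [levelsStep, hx, if_pos hne, List.mem_append, List.mem_singleton]
        constructor <;> aesop
      · have hT : PySem.Str.lower x ∉ T := fun hc => heq (by
          have := (h _).mpr hc; rw [hx] at this; exact Option.some_injective _ this)
        simp only [levelsStep, hx, if_pos hne, List.mem_append, List.mem_singleton]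
        constructor <;> aesop

-- characterisation of B's loop for the reachable accumulator values
lemma goB_char (xs : List String) (b : Option String)
    (hb : b = none ∨ b = some "Low" ∨ b = some "Medium") :
    goB xs b =
      if ∃ se ∈ xs, PySem.Str.lower se ∈ highSet then some "High"
      else if b = some "Medium" ∨ ∃ se ∈ xs, PySem.Str.lower se ∈ mediumSet then some "Medium"
      else if b = some "Low" ∨ ∃ se ∈ xs, PySem.Str.lower se ∈ lowSet then some "Low"
      else b := by
  induction xs generalizing b with
  | nil =>
    simp only [goB, List.not_mem_nil, false_and, exists_false, if_false, or_false]
    rcases hb with hb | hb | hb <;> simp [hb]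
  | cons x rest ih =>
    simp only [goB, List.mem_cons, exists_eq_or_imp]
    by_cases hH : PySem.Str.lower x ∈ highSet
    · simp [hH]
    · by_cases hM : PySem.Str.lower x ∈ mediumSet
      · rw [if_neg (by simpa [hH] using PySem.Set.contains), ih (some "Medium") (by simp)]
        simp [hH, hM]
      · by_cases hL : PySem.Str.lower x ∈ lowSet
        · by_cases hbn : b = none
          · subst hbn
            rw [if_neg (by simp [hH]), if_neg (by simp [hM]),
              if_pos (by simp [hL]), ih (some "Low") (by simp)]
            simp [hH, hM, hL]
          · rw [if_neg (by simp [hH]), if_neg (by simp [hM]),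
              if_neg (by simp [hbn]), ih b hb]
            rcases hb with hb | hb | hb
            · exact absurd hb hbn
            · simp [hH, hM, hL, hb]
            · simp [hH, hM, hb]
        · rw [if_neg (by simp [hH]), if_neg (by simp [hM]), if_neg (by simp [hL]), ih b hb]
          simp [hH, hM, hL]

-- ===== VERDICT =====
theorem classify_severity_from_list_spec : Claim_equal_classify_severity_from_list := by
  intro se_list _
  unfold Spec_classify_severity_from_list classify_severity_from_list classify_severity_from_list_alt
  by_cases hnil : se_list = []
  · subst hnil; rfl
  · rw [if_neg hnil, goB_char se_list none (Or.inl rfl)]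
    simp only [mem_levels_iff "High" highSet lookup_high se_list [],
      mem_levels_iff "Medium" mediumSet lookup_medium se_list [],
      mem_levels_iff "Low" lowSet lookup_low se_list [],
      List.not_mem_nil, false_or, reduceCtorEq]
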